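-- pv_equiv track=rewrite | github.com/Topl/PoS-visualization | relative_margin.py | left_catalan_slots
-- ===== SOURCE A (Python) =====
-- def partial_sum_min(w):
-- 	if w is None or w == "":
-- 		return [], []
--
-- 	n = len(w)
-- 	psum = [0] * (n+1)
-- 	pmin = [0] * (n+1)
--
-- 	# initial values
-- 	for i in range(n):
-- 		if w[i] == "1":
-- 			move = 1
-- 		else:
-- 			move = -1
-- 		psum[i+1] = psum[i] + move
-- 		pmin[i+1] = min(pmin[i], psum[i+1])
--
-- 	return psum, pmin
--
-- def left_catalan_slots(w):
-- 	if w is None or w == "":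
-- 		return []
--
-- 	lcat = []
-- 	n = len(w)
-- 	psum, pmin = partial_sum_min(w)
-- 	for i in range(n):
-- 		slot = i + 1
-- 		if w[i] == "0" and psum[slot] == pmin[slot] and pmin[slot] < pmin[slot - 1]:
-- 			lcat.append(slot)
--
-- 	return lcat
-- ===== SOURCE B (Python) =====
-- def left_catalan_slots(w):
--     if w is None or w == "":
--         return []
--     res = []
--     s = 0
--     mn = 0
--     for i, c in enumerate(w):
--         s += 1 if c == "1" else -1
--         if c == "0" and s < mn:
--             res.append(i + 1)
--         mn = min(mn, s)
--     return res
-- ===== Notes on version B (the rewrite author's own statement) =====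
-- stated objective: simpler
-- what changed: Replaced the helper that builds two (n+1)-element prefix-sum/prefix-min arrays plus a second indexed rescan by one linear pass keeping two scalars (running sum and running min), appending the 1-based slot index whenever a zero character drives the running sum below the previous minimum.
import Mathlib
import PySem

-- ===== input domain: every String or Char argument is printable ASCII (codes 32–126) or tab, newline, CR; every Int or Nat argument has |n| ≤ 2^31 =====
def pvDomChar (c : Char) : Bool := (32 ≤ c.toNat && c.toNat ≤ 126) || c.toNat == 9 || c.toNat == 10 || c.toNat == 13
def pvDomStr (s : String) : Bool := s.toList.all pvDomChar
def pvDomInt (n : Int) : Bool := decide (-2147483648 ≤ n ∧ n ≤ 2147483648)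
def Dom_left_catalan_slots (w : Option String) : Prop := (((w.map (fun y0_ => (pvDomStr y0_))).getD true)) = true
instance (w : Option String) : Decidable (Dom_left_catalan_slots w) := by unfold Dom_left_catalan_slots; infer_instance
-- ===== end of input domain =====

-- B replaces A's two-array helper + rescan by a single scalar-maintaining pass (simpler, O(1) extra space).

-- ===== PORT A =====
-- literal port of partial_sum_min: psum/pmin start as the [0] cells already written,
-- psum[i+1]=psum[i]+move / pmin[i+1]=min(pmin[i],psum[i+1]) become appends at index i+1
def partial_sum_min (w : Option String) : List Int × List Int :=
  match w with
  | none => ([], [])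
  | some s =>
    if s = "" then ([], [])
    else
      let cs := s.toList
      (List.range cs.length).foldl
        (fun (p : List Int × List Int) i =>
          let move : Int := if cs.getD i ' ' = '1' then 1 else -1
          let sNew := p.1.getD i 0 + move
          let mNew := min (p.2.getD i 0) sNew
          (p.1 ++ [sNew], p.2 ++ [mNew]))
        ([0], [0])

def left_catalan_slots (w : Option String) : List Int :=
  match w with
  | none => []
  | some s =>
    if s = "" then []
    else
      let cs := s.toList
      let pp := partial_sum_min w
      (List.range cs.length).foldl
        (fun acc i =>
          if cs.getD i ' ' = '0' ∧ pp.1.getD (i+1) 0 = pp.2.getD (i+1) 0 ∧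
              pp.2.getD (i+1) 0 < pp.2.getD i 0
          then acc ++ [((i : Int) + 1)] else acc)
        []

-- ===== PORT B =====
-- state = (res, i, sum, mn), exactly Source B's loop
def left_catalan_slots_alt (w : Option String) : List Int :=
  match w with
  | none => []
  | some s =>
    if s = "" then []
    else
      (s.toList.foldl
        (fun (st : List Int × Nat × Int × Int) c =>
          let sum' := st.2.2.1 + (if c = '1' then 1 else -1)
          let res' := if c = '0' ∧ sum' < st.2.2.2 then st.1 ++ [((st.2.1 : Int) + 1)] else st.1
          (res', st.2.1 + 1, sum', min st.2.2.2 sum'))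
        ([], 0, 0, 0)).1

-- ===== PRECONDITION & SPEC =====
def Spec_left_catalan_slots (w : Option String) (out : List Int) : Prop := out = left_catalan_slots_alt w
instance (w : Option String) (out : List Int) : Decidable (Spec_left_catalan_slots w out) := by unfold Spec_left_catalan_slots; infer_instance

-- ===== CLAIM (what is proved, stated in full; the proofs are below) =====
def Claim_equal_left_catalan_slots : Prop := ∀ (w : Option String), Dom_left_catalan_slots w → Spec_left_catalan_slots w (left_catalan_slots w)

-- ===== LEMMAS AND PROOFS =====

-- move of one character
def pvMove (c : Char) : Int := if c = '1' then 1 else -1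

-- prefix sum / prefix min of the first k characters
def pvS (cs : List Char) : Nat → Int
  | 0 => 0
  | k + 1 => pvS cs k + pvMove (cs.getD k ' ')

def pvM (cs : List Char) : Nat → Int
  | 0 => 0
  | k + 1 => min (pvM cs k) (pvS cs (k + 1))

-- canonical recursion both ports are reduced to
def pvG : List Char → Nat → Int → Int → List Int
  | [], _, _, _ => []
  | c :: rest, i, s, mn =>
    let s' := s + pvMove c
    (if c = '0' ∧ s' < mn then [((i : Int) + 1)] else []) ++ pvG rest (i + 1) s' (min mn s')

lemma getD_map_range_succ (f : Nat → Int) (n i : Nat) (h : i ≤ n) :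
    ((List.range (n + 1)).map f).getD i 0 = f i := by
  simp [List.getD, Nat.lt_succ_of_le h]

lemma A1 (cs : List Char) (n : Nat) :
    (List.range n).foldl
      (fun (p : List Int × List Int) i =>
        let move : Int := if cs.getD i ' ' = '1' then 1 else -1
        let sNew := p.1.getD i 0 + move
        let mNew := min (p.2.getD i 0) sNew
        (p.1 ++ [sNew], p.2 ++ [mNew]))
      ([0], [0])
    = ((List.range (n + 1)).map (pvS cs), (List.range (n + 1)).map (pvM cs)) := by
  induction n with
  | zero => simp [pvS, pvM]
  | succ n ih =>
    rw [List.range_succ, List.foldl_append, ih]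
    simp only [List.foldl_cons, List.foldl_nil]
    rw [getD_map_range_succ (pvS cs) n n le_rfl, getD_map_range_succ (pvM cs) n n le_rfl]
    simp only [Prod.mk.injEq]
    refine ⟨?_, ?_⟩
    · rw [List.range_succ (n := n + 1), List.map_append]
      simp [pvS, pvMove]
    · rw [List.range_succ (n := n + 1), List.map_append]
      simp [pvM, pvS, pvMove]

lemma B1 (cs : List Char) : ∀ (res : List Int) (i : Nat) (s mn : Int),
    (cs.foldl
      (fun (st : List Int × Nat × Int × Int) c =>
        let sum' := st.2.2.1 + (if c = '1' then 1 else -1)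
        let res' := if c = '0' ∧ sum' < st.2.2.2 then st.1 ++ [((st.2.1 : Int) + 1)] else st.1
        (res', st.2.1 + 1, sum', min st.2.2.2 sum'))
      (res, i, s, mn)).1 = res ++ pvG cs i s mn := by
  induction cs with
  | nil => intro res i s mn; simp [pvG]
  | cons c rest ih =>
    intro res i s mn
    simp only [List.foldl_cons, pvG, pvMove]
    rw [ih]
    split_ifs <;> simp

lemma key (cs : List Char) : ∀ (k : Nat), k ≤ cs.length →
    pvG (cs.drop k) k (pvS cs k) (pvM cs k)
    = ((List.range' k (cs.length - k)).filter
        (fun i => decide (cs.getD i ' ' = '0' ∧ pvS cs (i + 1) < pvM cs i))).map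
        (fun i : Nat => ((i : Int) + 1)) := by
  intro k hk
  induction hn : cs.length - k generalizing k with
  | zero =>
    have : k = cs.length := by omega
    subst this
    simp [pvG]
  | succ m ih =>
    have hklt : k < cs.length := by omega
    have hdrop : cs.drop k = cs[k] :: cs.drop (k + 1) := List.drop_eq_getElem_cons hklt
    have hgd : cs[k]?.getD ' ' = cs[k] := by simp [List.getElem?_eq_getElem hklt]
    rw [hdrop, List.range'_succ, List.filter_cons]
    have hS : pvS cs k + pvMove cs[k] = pvS cs (k + 1) := by
      simp [pvS, List.getD, hgd]
    have hM : min (pvM cs k) (pvS cs (k + 1)) = pvM cs (k + 1) := by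
      simp [pvM]
    simp only [pvG, hS, hM]
    rw [ih (k + 1) (by omega) (by omega)]
    by_cases h : cs[k] = '0' ∧ pvS cs (k + 1) < pvM cs k
    · simp [List.getD, hgd, h]
    · simp [List.getD, hgd, h]

lemma cond_equiv (cs : List Char) (i : Nat) :
    (cs.getD i ' ' = '0' ∧ pvS cs (i + 1) = pvM cs (i + 1) ∧ pvM cs (i + 1) < pvM cs i)
    ↔ (cs.getD i ' ' = '0' ∧ pvS cs (i + 1) < pvM cs i) := by
  have hM : pvM cs (i + 1) = min (pvM cs i) (pvS cs (i + 1)) := by simp [pvM]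
  constructor
  · rintro ⟨h0, h1, h2⟩; exact ⟨h0, by omega⟩
  · rintro ⟨h0, h1⟩; refine ⟨h0, by omega, by omega⟩

lemma A2 (cs : List Char) :
    (List.range cs.length).foldl
      (fun acc i =>
        if cs.getD i ' ' = '0' ∧
            ((List.range (cs.length + 1)).map (pvS cs)).getD (i+1) 0 =
              ((List.range (cs.length + 1)).map (pvM cs)).getD (i+1) 0 ∧
            ((List.range (cs.length + 1)).map (pvM cs)).getD (i+1) 0 <
              ((List.range (cs.length + 1)).map (pvM cs)).getD i 0
        then acc ++ [((i : Int) + 1)] else acc)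
      []
    = pvG cs 0 0 0 := by
  rw [PySem.List.foldl_append_ite]
  have hfc : (List.range cs.length).filter
      (fun i => decide (cs.getD i ' ' = '0' ∧
        ((List.range (cs.length + 1)).map (pvS cs)).getD (i+1) 0 =
          ((List.range (cs.length + 1)).map (pvM cs)).getD (i+1) 0 ∧
        ((List.range (cs.length + 1)).map (pvM cs)).getD (i+1) 0 <
          ((List.range (cs.length + 1)).map (pvM cs)).getD i 0))
      = (List.range cs.length).filter
      (fun i => decide (cs.getD i ' ' = '0' ∧ pvS cs (i + 1) < pvM cs i)) := by
    apply List.filter_congr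
    intro i hi
    have hlt : i < cs.length := List.mem_range.mp hi
    rw [getD_map_range_succ (pvS cs) cs.length (i+1) (by omega),
        getD_map_range_succ (pvM cs) cs.length (i+1) (by omega),
        getD_map_range_succ (pvM cs) cs.length i (by omega)]
    simp only [decide_eq_decide]
    exact cond_equiv cs i
  rw [hfc]
  have := key cs 0 (Nat.zero_le _)
  have h0 : pvS cs 0 = 0 := rfl
  have h1 : pvM cs 0 = 0 := rfl
  rw [List.drop_zero, Nat.sub_zero, h0, h1] at this
  rw [List.nil_append, List.range_eq_range', ← this]

-- ===== VERDICT (by name: the statement is the Claim_ definition above) =====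
theorem left_catalan_slots_spec : Claim_equal_left_catalan_slots := by
  intro w _
  unfold Spec_left_catalan_slots left_catalan_slots left_catalan_slots_alt partial_sum_min
  match w with
  | none => rfl
  | some s =>
    by_cases hs : s = ""
    · simp [hs]
    · simp only [hs, if_false]
      rw [B1 s.toList [] 0 0 0, List.nil_append, A1 s.toList]
      exact A2 s.toList
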